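-- pv_equiv track=rewrite | github.com/johnhendrick/advent-of-code2022 | adventofcode2022/day18.py | find_surface_areas
-- ===== SOURCE A (Python) =====
-- def get_neighbours(cube: list[int]):
--     fix = [(0, 1, 2), (0, 2, 1), (1, 2, 0)]
--     neighbour_coors = []
--
--     for fixed_coor1, fixed_coor2, update_coor in fix:
--         empty = [0, 0, 0]
--         empty[fixed_coor1] = cube[fixed_coor1]
--         empty[fixed_coor2] = cube[fixed_coor2]
--         empty[update_coor] = cube[update_coor] + 1
--         neighbour_coors.append(tuple(empty))
--         empty[update_coor] = cube[update_coor] - 1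
--         neighbour_coors.append(tuple(empty))
--     return neighbour_coors
--
-- def is_inside(loc: tuple, all_coors: list[tuple]) -> bool:
--     try:
--         x_min = min(set(filter(lambda l: (l[1], l[2]) == (loc[1], loc[2]), all_coors)), key=lambda l: l[0])[0]
--         y_min = min(set(filter(lambda l: (l[2], l[0]) == (loc[2], loc[0]), all_coors)), key=lambda l: l[1])[1]
--         z_min = min(set(filter(lambda l: (l[1], l[0]) == (loc[1], loc[0]), all_coors)), key=lambda l: l[2])[2]
--         x_max = max(set(filter(lambda l: (l[1], l[2]) == (loc[1], loc[2]), all_coors)), key=lambda l: l[0])[0]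
--         y_max = max(set(filter(lambda l: (l[2], l[0]) == (loc[2], loc[0]), all_coors)), key=lambda l: l[1])[1]
--         z_max = max(set(filter(lambda l: (l[1], l[0]) == (loc[1], loc[0]), all_coors)), key=lambda l: l[2])[2]
--
--         for ele, boundary in zip(loc, [(x_min, x_max), (y_min, y_max), (z_min, z_max)]):
--             if ele < boundary[0] or ele > boundary[1]:
--                 return False
--         return True
--     except:
--         return False
--
-- def find_surface_areas(
--     cube_coors: set[tuple], all_coors: set[tuple] = None, check_holes: bool = True, internal_mode=False
-- ) -> (list[tuple], list[tuple]):
--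
--     surface_area = 0
--     internal_cubes = set()
--     if all_coors is None:
--         all_coors = cube_coors
--
--     for cube in cube_coors:
--         cube_neighbours = get_neighbours(cube)
--
--         if internal_mode:
--             sides = len(set(cube_neighbours).intersection(all_coors))
--         else:
--             sides = 6
--             sides -= len(set(cube_neighbours).intersection(all_coors))
--
--         surface_area += sides
--
--         if check_holes:
--             found_spaces = set(cube_neighbours).difference(cube_coors)
--             for ele in found_spaces:
--                 if is_inside(ele, cube_coors):
--                     internal_cubes.add(ele)
--     return surface_area, internal_cubes
-- ===== SOURCE B (Python) =====
-- def find_surface_areas(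
--     cube_coors, all_coors=None, check_holes=True, internal_mode=False
-- ):
--     if all_coors is None:
--         all_coors = cube_coors
--     occ = set(all_coors)
--     cubes = set(cube_coors)
--
--     # one pass: per-axis line extrema, keyed exactly by the two fixed coordinates
--     xb, yb, zb = {}, {}, {}
--     for (x, y, z) in cube_coors:
--         lo, hi = xb.get((y, z), (x, x)); xb[(y, z)] = (min(lo, x), max(hi, x))
--         lo, hi = yb.get((z, x), (y, y)); yb[(z, x)] = (min(lo, y), max(hi, y))
--         lo, hi = zb.get((y, x), (z, z)); zb[(y, x)] = (min(lo, z), max(hi, z))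
--
--     surface_area = 0
--     internal_cubes = set()
--     for (x, y, z) in cube_coors:
--         for n in ((x, y, z + 1), (x, y, z - 1), (x, y + 1, z),
--                   (x, y - 1, z), (x + 1, y, z), (x - 1, y, z)):
--             hit = n in occ
--             if internal_mode:
--                 surface_area += 1 if hit else 0
--             else:
--                 surface_area += 0 if hit else 1
--             if check_holes and n not in cubes:
--                 nx, ny, nz = n
--                 bx = xb.get((ny, nz))
--                 by = yb.get((nz, nx))
--                 bz = zb.get((ny, nx))
--                 if (bx is not None and by is not None and bz is not None
--                         and bx[0] <= nx <= bx[1]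
--                         and by[0] <= ny <= by[1]
--                         and bz[0] <= nz <= bz[1]):
--                     internal_cubes.add(n)
--     return surface_area, internal_cubes
-- ===== Notes on version B (the rewrite author's own statement) =====
-- stated objective: faster
-- what changed: B precomputes three per-axis-line (min,max) extrema dictionaries in one pass and replaces A's per-candidate is_inside, which refilters and rescans the whole cube set six times, by O(1) dictionary lookups (measured ~88x at n=262144 on check_holes inputs; ~1x when check_holes is false, since A does no is_inside scans there).
import Mathlib
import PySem

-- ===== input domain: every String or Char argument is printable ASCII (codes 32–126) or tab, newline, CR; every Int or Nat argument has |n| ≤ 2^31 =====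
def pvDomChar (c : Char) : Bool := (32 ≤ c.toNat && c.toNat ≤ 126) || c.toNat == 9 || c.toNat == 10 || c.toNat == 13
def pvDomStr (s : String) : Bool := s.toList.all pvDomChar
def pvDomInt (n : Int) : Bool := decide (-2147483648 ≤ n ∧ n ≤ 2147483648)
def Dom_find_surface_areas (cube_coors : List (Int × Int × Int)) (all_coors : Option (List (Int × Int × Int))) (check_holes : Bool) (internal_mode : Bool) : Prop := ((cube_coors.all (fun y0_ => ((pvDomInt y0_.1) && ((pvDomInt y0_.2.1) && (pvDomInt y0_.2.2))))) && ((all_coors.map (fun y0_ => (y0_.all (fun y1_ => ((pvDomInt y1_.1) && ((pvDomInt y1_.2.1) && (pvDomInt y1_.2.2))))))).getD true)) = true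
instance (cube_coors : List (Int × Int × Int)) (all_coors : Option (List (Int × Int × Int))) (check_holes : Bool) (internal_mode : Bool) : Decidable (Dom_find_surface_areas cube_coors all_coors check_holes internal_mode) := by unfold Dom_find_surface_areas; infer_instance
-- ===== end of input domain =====

-- B replaces A's per-candidate min/max line scans (is_inside) by three per-axis-line extrema
-- dictionaries built in one pass (objective: faster on check_holes inputs, where A rescans the
-- cube set per candidate; when check_holes is false both are one pass and a timing run saw ~1x).
-- The set-valued second component is a set (compared as a set); both ports build it in the same
-- deterministic candidate order.

-- ===== PORT A =====
-- cube[i] for the 3-tuple (exact: A only indexes with 0,1,2)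
def pyTupGet (c : Int × Int × Int) (i : Nat) : Int :=
  match i with | 0 => c.1 | 1 => c.2.1 | _ => c.2.2

-- tuple(empty) for the always-3-element working list (exact here)
def pyTuple3 (l : List Int) : Int × Int × Int := (l.getD 0 0, l.getD 1 0, l.getD 2 0)

def get_neighbours (cube : Int × Int × Int) : List (Int × Int × Int) :=
  let fix : List (Nat × Nat × Nat) := [(0, 1, 2), (0, 2, 1), (1, 2, 0)]
  fix.foldl (fun neighbour_coors f =>
    let empty : List Int := [0, 0, 0]
    let empty := empty.set f.1 (pyTupGet cube f.1)
    let empty := empty.set f.2.1 (pyTupGet cube f.2.1)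
    let e1 := empty.set f.2.2 (pyTupGet cube f.2.2 + 1)
    let nc := neighbour_coors ++ [pyTuple3 e1]
    let e2 := e1.set f.2.2 (pyTupGet cube f.2.2 - 1)
    nc ++ [pyTuple3 e2]) []

-- the bare `except: return False` catches exactly the ValueError of min/max on an empty
-- sequence: every `none` of the six min?/max? below lands in the catch-all `false` arm
def is_inside (loc : Int × Int × Int) (all_coors : List (Int × Int × Int)) : Bool :=
  let fX := PySem.Set.ofList (all_coors.filter (fun l => decide ((l.2.1, l.2.2) = (loc.2.1, loc.2.2))))
  let fY := PySem.Set.ofList (all_coors.filter (fun l => decide ((l.2.2, l.1) = (loc.2.2, loc.1))))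
  let fZ := PySem.Set.ofList (all_coors.filter (fun l => decide ((l.2.1, l.1) = (loc.2.1, loc.1))))
  match PySem.List.min? fX (fun l => l.1), PySem.List.min? fY (fun l => l.2.1),
        PySem.List.min? fZ (fun l => l.2.2), PySem.List.max? fX (fun l => l.1),
        PySem.List.max? fY (fun l => l.2.1), PySem.List.max? fZ (fun l => l.2.2) with
  | some xmn, some ymn, some zmn, some xmx, some ymx, some zmx =>
      -- the zip loop: first out-of-bounds coordinate returns False
      if loc.1 < xmn.1 || loc.1 > xmx.1 then false
      else if loc.2.1 < ymn.2.1 || loc.2.1 > ymx.2.1 then false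
      else if loc.2.2 < zmn.2.2 || loc.2.2 > zmx.2.2 then false
      else true
  | _, _, _, _, _, _ => false

-- the body of A's `for cube in cube_coors` loop
def fsaA_body (cube_coors all_coors : List (Int × Int × Int)) (check_holes internal_mode : Bool)
    (st : Int × List (Int × Int × Int)) (cube : Int × Int × Int) : Int × List (Int × Int × Int) :=
  let cube_neighbours := get_neighbours cube
  let sides : Int :=
    if internal_mode then ((PySem.Set.ofList cube_neighbours).inter all_coors).length
    else 6 - ((PySem.Set.ofList cube_neighbours).inter all_coors).length
  let surface_area := st.1 + sides
  let internal_cubes :=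
    if check_holes then
      ((PySem.Set.ofList cube_neighbours).diff cube_coors).foldl
        (fun s ele => if is_inside ele cube_coors then PySem.Set.add s ele else s) st.2
    else st.2
  (surface_area, internal_cubes)

def find_surface_areas (cube_coors : List (Int × Int × Int)) (all_coors : Option (List (Int × Int × Int))) (check_holes : Bool) (internal_mode : Bool) : Int × (List (Int × Int × Int)) :=
  let all_coors' := match all_coors with | none => cube_coors | some a => a
  cube_coors.foldl (fsaA_body cube_coors all_coors' check_holes internal_mode)
    (0, (PySem.Set.empty : PySem.Set (Int × Int × Int)))

-- ===== PORT B =====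
-- the literal tuple of 6 neighbours B iterates over
def neighbours6 (c : Int × Int × Int) : List (Int × Int × Int) :=
  [(c.1, c.2.1, c.2.2 + 1), (c.1, c.2.1, c.2.2 - 1),
   (c.1, c.2.1 + 1, c.2.2), (c.1, c.2.1 - 1, c.2.2),
   (c.1 + 1, c.2.1, c.2.2), (c.1 - 1, c.2.1, c.2.2)]

-- lo, hi = d.get(k, (v, v)); d[k] = (min(lo, v), max(hi, v))
def fsaB_bstep (d : PySem.Dict (Int × Int) (Int × Int)) (k : Int × Int) (v : Int) :
    PySem.Dict (Int × Int) (Int × Int) :=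
  let lh := d.getD k (v, v)
  d.insert k (min lh.1 v, max lh.2 v)

abbrev BDicts := PySem.Dict (Int × Int) (Int × Int) × PySem.Dict (Int × Int) (Int × Int) × PySem.Dict (Int × Int) (Int × Int)

-- one pass over cube_coors building the three per-axis-line extrema dicts
def fsaB_bounds (cube_coors : List (Int × Int × Int)) : BDicts :=
  cube_coors.foldl (fun b c =>
      (fsaB_bstep b.1 (c.2.1, c.2.2) c.1,
       fsaB_bstep b.2.1 (c.2.2, c.1) c.2.1,
       fsaB_bstep b.2.2 (c.2.1, c.1) c.2.2))
    (PySem.Dict.empty, PySem.Dict.empty, PySem.Dict.empty)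

-- the O(1) inside test: bx, by, bz dict lookups plus bound comparisons
def fsaB_check (bds : BDicts) (n : Int × Int × Int) : Bool :=
  match bds.1.get? (n.2.1, n.2.2), bds.2.1.get? (n.2.2, n.1), bds.2.2.get? (n.2.1, n.1) with
  | some bx, some b_y, some bz =>
      decide (bx.1 ≤ n.1 ∧ n.1 ≤ bx.2 ∧ b_y.1 ≤ n.2.1 ∧ n.2.1 ≤ b_y.2 ∧
              bz.1 ≤ n.2.2 ∧ n.2.2 ≤ bz.2)
  | _, _, _ => false

-- the body of B's `for (x, y, z) in cube_coors` loop (the inner loop over the 6 neighbours)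
def fsaB_body (occ cubes : List (Int × Int × Int)) (bds : BDicts)
    (check_holes internal_mode : Bool)
    (st : Int × List (Int × Int × Int)) (c : Int × Int × Int) : Int × List (Int × Int × Int) :=
  (neighbours6 c).foldl (fun st n =>
    let hit := PySem.Set.contains occ n
    let sa := st.1 + (if internal_mode then (if hit then (1 : Int) else 0)
                      else (if hit then (0 : Int) else 1))
    let ic := if check_holes && !(PySem.Set.contains cubes n) then
        (if fsaB_check bds n then PySem.Set.add st.2 n else st.2)
      else st.2
    (sa, ic)) st

def find_surface_areas_alt (cube_coors : List (Int × Int × Int)) (all_coors : Option (List (Int × Int × Int))) (check_holes : Bool) (internal_mode : Bool) : Int × (List (Int × Int × Int)) :=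
  let all_coors' := match all_coors with | none => cube_coors | some a => a
  let occ := PySem.Set.ofList all_coors'
  let cubes := PySem.Set.ofList cube_coors
  let bds := fsaB_bounds cube_coors
  cube_coors.foldl (fsaB_body occ cubes bds check_holes internal_mode)
    (0, (PySem.Set.empty : PySem.Set (Int × Int × Int)))

-- ===== PRECONDITION & SPEC =====
def Spec_find_surface_areas (cube_coors : List (Int × Int × Int)) (all_coors : Option (List (Int × Int × Int))) (check_holes : Bool) (internal_mode : Bool) (out : Int × (List (Int × Int × Int))) : Prop := out = find_surface_areas_alt cube_coors all_coors check_holes internal_mode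
instance (cube_coors : List (Int × Int × Int)) (all_coors : Option (List (Int × Int × Int))) (check_holes : Bool) (internal_mode : Bool) (out : Int × (List (Int × Int × Int))) : Decidable (Spec_find_surface_areas cube_coors all_coors check_holes internal_mode out) := by unfold Spec_find_surface_areas; infer_instance

-- ===== CLAIM (what is proved, stated in full; the proofs are below) =====
def Claim_equal_find_surface_areas : Prop := ∀ (cube_coors : List (Int × Int × Int)) (all_coors : Option (List (Int × Int × Int))) (check_holes : Bool) (internal_mode : Bool), Dom_find_surface_areas cube_coors all_coors check_holes internal_mode → Spec_find_surface_areas cube_coors all_coors check_holes internal_mode (find_surface_areas cube_coors all_coors check_holes internal_mode)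

-- ===== LEMMAS AND PROOFS =====

theorem get_neighbours_eq (c : Int × Int × Int) : get_neighbours c = neighbours6 c := by
  rfl

theorem neighbours6_nodup (c : Int × Int × Int) : (neighbours6 c).Nodup := by
  simp [neighbours6, Prod.ext_iff]
  omega

-- --- generic facts about B's bounds dictionaries ---

def pvBnd (o : Option (Int × Int)) (x : Int) : Option (Int × Int) :=
  match o with
  | none => some (x, x)
  | some lh => some (min lh.1 x, max lh.2 x)

theorem contains_ofList (l : List (Int × Int × Int)) (n : Int × Int × Int) :
    PySem.Set.contains (PySem.Set.ofList l) n = l.contains n := by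
  by_cases h : n ∈ l <;>
    simp [PySem.Set.contains_eq_listContains, PySem.Set.mem_ofList, h]

theorem ofList_nil_iff {T : Type} [BEq T] [LawfulBEq T] (l : List T) :
    PySem.Set.ofList l = [] ↔ l = [] := by
  constructor
  · intro h
    cases l with
    | nil => rfl
    | cons c t =>
      have hc : c ∈ PySem.Set.ofList (c :: t) := (PySem.Set.mem_ofList _ c).2 (by simp)
      rw [h] at hc; simp at hc
  · intro h; subst h; rfl

theorem bstep_get? (d : PySem.Dict (Int × Int) (Int × Int)) (k q : Int × Int) (v : Int) :
    (fsaB_bstep d k v).get? q = if q = k then pvBnd (d.get? k) v else d.get? q := by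
  simp only [fsaB_bstep, PySem.Dict.get?_insert, PySem.Dict.getD_eq_get?_getD]
  cases hd : d.get? k <;> simp [pvBnd]

theorem bounds_get {T : Type} (k : T → Int × Int) (v : T → Int) :
    ∀ (S : List T) (d : PySem.Dict (Int × Int) (Int × Int)) (q : Int × Int),
    (S.foldl (fun d c => fsaB_bstep d (k c) (v c)) d).get? q
      = ((S.filter (fun c => decide (k c = q))).map v).foldl pvBnd (d.get? q) := by
  intro S
  induction S with
  | nil => intro d q; rfl
  | cons c S ih =>
    intro d q
    simp only [List.foldl_cons, List.filter_cons]
    rw [ih]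
    by_cases h : k c = q
    · subst h
      simp [bstep_get?]
    · have h' : q ≠ k c := fun hh => h hh.symm
      simp [bstep_get?, h, h']

theorem pvBnd_some : ∀ (L : List Int) (a b : Int),
    L.foldl pvBnd (some (a, b)) = some (L.foldl min a, L.foldl max b) := by
  intro L
  induction L with
  | nil => intro a b; rfl
  | cons x t ih => intro a b; simp only [List.foldl_cons, pvBnd, ih]

theorem fsaB_bounds_eq (S : List (Int × Int × Int)) :
    fsaB_bounds S =
      (S.foldl (fun d c => fsaB_bstep d (c.2.1, c.2.2) c.1) PySem.Dict.empty,
       S.foldl (fun d c => fsaB_bstep d (c.2.2, c.1) c.2.1) PySem.Dict.empty,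
       S.foldl (fun d c => fsaB_bstep d (c.2.1, c.1) c.2.2) PySem.Dict.empty) := by
  unfold fsaB_bounds
  rw [PySem.List.foldl_prod_mk
        (fun d (c : Int × Int × Int) => fsaB_bstep d (c.2.1, c.2.2) c.1)
        (fun b (c : Int × Int × Int) =>
          (fsaB_bstep b.1 (c.2.2, c.1) c.2.1, fsaB_bstep b.2 (c.2.1, c.1) c.2.2)),
      PySem.List.foldl_prod_mk
        (fun d (c : Int × Int × Int) => fsaB_bstep d (c.2.2, c.1) c.2.1)
        (fun d (c : Int × Int × Int) => fsaB_bstep d (c.2.1, c.1) c.2.2)]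

-- the value of the first extremal element's key coordinate is the running fold min/max
theorem minkey_eq {T : Type} [BEq T] [LawfulBEq T] (l : List T) (key : T → Int) (m : T)
    (h : Int) (t : List Int)
    (hm : PySem.List.min? (PySem.Set.ofList l) key = some m) (hl : l.map key = h :: t) :
    key m = t.foldl min h := by
  have hmem : m ∈ l := (PySem.Set.mem_ofList l m).1 (PySem.List.min?_mem hm)
  have hmin := PySem.List.min?_isMin hm
  have hmu := PySem.List.min?_id_cons h t
  have hmumem : (t.foldl min h) ∈ h :: t := PySem.List.min?_mem hmu
  have hmumin := PySem.List.min?_isMin hmu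
  rw [← hl] at hmumem hmumin
  obtain ⟨y, hy, hyv⟩ := List.mem_map.1 hmumem
  apply le_antisymm
  · rw [← hyv]; exact hmin y ((PySem.Set.mem_ofList l y).2 hy)
  · exact hmumin (key m) (List.mem_map_of_mem hmem)

theorem maxkey_eq {T : Type} [BEq T] [LawfulBEq T] (l : List T) (key : T → Int) (m : T)
    (h : Int) (t : List Int)
    (hm : PySem.List.max? (PySem.Set.ofList l) key = some m) (hl : l.map key = h :: t) :
    key m = t.foldl max h := by
  have hmem : m ∈ l := (PySem.Set.mem_ofList l m).1 (PySem.List.max?_mem hm)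
  have hmax := PySem.List.max?_isMax hm
  have hmu := PySem.List.max?_id_cons h t
  have hmumem : (t.foldl max h) ∈ h :: t := PySem.List.max?_mem hmu
  have hmumax := PySem.List.max?_isMax hmu
  rw [← hl] at hmumem hmumax
  obtain ⟨y, hy, hyv⟩ := List.mem_map.1 hmumem
  apply le_antisymm
  · exact hmumax (key m) (List.mem_map_of_mem hmem)
  · rw [← hyv]; exact hmax y ((PySem.Set.mem_ofList l y).2 hy)

-- the two readings of one axis line: foldl pvBnd vs min?/max? with a key
theorem axis_none {T : Type} [BEq T] [LawfulBEq T] (l : List T) (key : T → Int)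
    (hr : (l.map key).foldl pvBnd none = none) : l = [] := by
  cases l with
  | nil => rfl
  | cons c t =>
    rw [List.map_cons, List.foldl_cons] at hr
    rw [show pvBnd none (key c) = some (key c, key c) from rfl, pvBnd_some] at hr
    cases hr

theorem axis_some {T : Type} [BEq T] [LawfulBEq T] (l : List T) (key : T → Int) (r : Int × Int)
    (hr : (l.map key).foldl pvBnd none = some r) :
    ∃ mn mx, PySem.List.min? (PySem.Set.ofList l) key = some mn ∧
      PySem.List.max? (PySem.Set.ofList l) key = some mx ∧ key mn = r.1 ∧ key mx = r.2 := by
  cases l with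
  | nil => cases hr
  | cons c t =>
    have hl : (c :: t).map key = key c :: t.map key := by simp
    obtain ⟨mn, hmn⟩ : ∃ mn, PySem.List.min? (PySem.Set.ofList (c :: t)) key = some mn := by
      cases hmn : PySem.List.min? (PySem.Set.ofList (c :: t)) key with
      | none =>
        rw [PySem.List.min?_eq_none_iff, ofList_nil_iff] at hmn
        cases hmn
      | some mn => exact ⟨mn, rfl⟩
    obtain ⟨mx, hmx⟩ : ∃ mx, PySem.List.max? (PySem.Set.ofList (c :: t)) key = some mx := by
      cases hmx : PySem.List.max? (PySem.Set.ofList (c :: t)) key with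
      | none =>
        rw [PySem.List.max?_eq_none_iff, ofList_nil_iff] at hmx
        cases hmx
      | some mx => exact ⟨mx, rfl⟩
    rw [hl, List.foldl_cons, show pvBnd none (key c) = some (key c, key c) from rfl,
        pvBnd_some] at hr
    have hr' := (Option.some.inj hr).symm
    refine ⟨mn, mx, hmn, hmx, ?_, ?_⟩
    · rw [minkey_eq (c :: t) key mn (key c) (t.map key) hmn hl, hr']
    · rw [maxkey_eq (c :: t) key mx (key c) (t.map key) hmx hl, hr']

-- A's per-candidate line-scan inside test equals B's dictionary-lookup test
theorem is_inside_eq (S : List (Int × Int × Int)) (n : Int × Int × Int) :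
    is_inside n S = fsaB_check (fsaB_bounds S) n := by
  have hX := bounds_get (fun c : Int × Int × Int => (c.2.1, c.2.2)) (fun c => c.1) S
      PySem.Dict.empty (n.2.1, n.2.2)
  have hY := bounds_get (fun c : Int × Int × Int => (c.2.2, c.1)) (fun c => c.2.1) S
      PySem.Dict.empty (n.2.2, n.1)
  have hZ := bounds_get (fun c : Int × Int × Int => (c.2.1, c.1)) (fun c => c.2.2) S
      PySem.Dict.empty (n.2.1, n.1)
  rw [PySem.Dict.get?_empty] at hX hY hZ

  unfold is_inside fsaB_check
  rw [fsaB_bounds_eq]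
  simp only []
  rw [hX, hY, hZ]
  cases hbx : (List.map (fun c : Int × Int × Int => c.1)
      (S.filter (fun c : Int × Int × Int => decide ((c.2.1, c.2.2) = (n.2.1, n.2.2))))).foldl
        pvBnd none with
  | none =>
    rw [axis_none _ _ hbx]
    rfl
  | some bx =>
    obtain ⟨xmn, xmx, hxmn, hxmx, hv1, hv2⟩ := axis_some _ _ _ hbx
    rw [hxmn, hxmx]
    cases hby : (List.map (fun c : Int × Int × Int => c.2.1)
        (S.filter (fun c : Int × Int × Int => decide ((c.2.2, c.1) = (n.2.2, n.1))))).foldl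
          pvBnd none with
    | none =>
      rw [axis_none _ _ hby]
      rfl
    | some b_y =>
      obtain ⟨ymn, ymx, hymn, hymx, hw1, hw2⟩ := axis_some _ _ _ hby
      rw [hymn, hymx]
      cases hbz : (List.map (fun c : Int × Int × Int => c.2.2)
          (S.filter (fun c : Int × Int × Int => decide ((c.2.1, c.1) = (n.2.1, n.1))))).foldl
            pvBnd none with
      | none =>
        rw [axis_none _ _ hbz]
        rfl
      | some bz =>
        obtain ⟨zmn, zmx, hzmn, hzmx, hu1, hu2⟩ := axis_some _ _ _ hbz
        rw [hzmn, hzmx]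
        simp only [hv1, hv2, hw1, hw2, hu1, hu2]
        split_ifs <;> simp_all <;> omega

theorem foldl_add_ite (p : (Int × Int × Int) → Bool) (l : List (Int × Int × Int)) (a : Int) :
    l.foldl (fun s n => s + (if p n then (1 : Int) else 0)) a = a + (l.countP p : Int) := by
  rw [PySem.List.foldl_congr_mem l _ (fun acc x => if p x then acc + 1 else acc) a
      (by intro acc x _; by_cases h : p x <;> simp [h])]
  exact PySem.List.foldl_count_if p l a

theorem foldl_add_ite_neg (p : (Int × Int × Int) → Bool) (l : List (Int × Int × Int)) (a : Int) :
    l.foldl (fun s n => s + (if p n then (0 : Int) else 1)) a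
      = a + (l.countP (fun n => !p n) : Int) := by
  rw [PySem.List.foldl_congr_mem l _
      (fun s n => s + (if (!p n) then (1 : Int) else 0)) a
      (by intro acc x _; by_cases h : p x <;> simp [h])]
  exact foldl_add_ite (fun n => !p n) l a

-- the two loop bodies agree step for step
theorem body_eq (cube_coors all : List (Int × Int × Int)) (ch im : Bool)
    (st : Int × List (Int × Int × Int)) (c : Int × Int × Int) :
    fsaA_body cube_coors all ch im st c
      = fsaB_body (PySem.Set.ofList all) (PySem.Set.ofList cube_coors)
          (fsaB_bounds cube_coors) ch im st c := by
  simp only [fsaA_body, fsaB_body, get_neighbours_eq]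
  rw [show st = (st.1, st.2) from rfl]
  rw [PySem.List.foldl_prod_mk
      (fun a (n : Int × Int × Int) => a + (if im then (if PySem.Set.contains (PySem.Set.ofList all) n then (1 : Int) else 0)
                       else (if PySem.Set.contains (PySem.Set.ofList all) n then (0 : Int) else 1)))
      (fun b (n : Int × Int × Int) => if ch && !(PySem.Set.contains (PySem.Set.ofList cube_coors) n) then
          (if fsaB_check (fsaB_bounds cube_coors) n then PySem.Set.add b n else b)
        else b)]
  have hfc : ∀ x ∈ neighbours6 c,
      (fun n => PySem.Set.contains (PySem.Set.ofList all) n) x = (fun x => all.contains x) x :=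
    fun x _ => contains_ofList all x
  have hinter : ((PySem.Set.ofList (neighbours6 c)).inter all).length
      = (neighbours6 c).countP (fun n => PySem.Set.contains (PySem.Set.ofList all) n) := by
    rw [PySem.Set.ofList_eq_self_of_nodup _ (neighbours6_nodup c), List.countP_eq_length_filter,
      List.filter_congr hfc]
    rfl
  refine Prod.ext ?_ ?_
  · cases im with
    | true =>
      simp only [if_true]
      rw [foldl_add_ite, hinter]
    | false =>
      simp only [Bool.false_eq_true, if_false]
      rw [foldl_add_ite_neg, hinter]
      have hcnt := List.length_eq_countP_add_countP
        (fun n => PySem.Set.contains (PySem.Set.ofList all) n) (l := neighbours6 c)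
      have hlen : (neighbours6 c).length = 6 := by simp [neighbours6]
      rw [hlen] at hcnt
      simp only [decide_not, Bool.decide_eq_true] at hcnt
      omega
  · cases ch with
    | true =>
      simp only [Bool.true_and, if_true]
      rw [show ((PySem.Set.ofList (neighbours6 c)).diff cube_coors)
            = (neighbours6 c).filter (fun x => !cube_coors.contains x) by
          rw [PySem.Set.ofList_eq_self_of_nodup _ (neighbours6_nodup c)]; rfl]
      rw [List.foldl_filter]
      refine PySem.List.foldl_congr_mem _ _ _ _ ?_
      intro acc x _
      simp [is_inside_eq]
    | false => rfl
theorem find_surface_areas_spec : Claim_equal_find_surface_areas := by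
  intro cube_coors all_coors ch im _
  unfold Spec_find_surface_areas find_surface_areas find_surface_areas_alt
  cases all_coors with
  | none =>
    have hb : fsaA_body cube_coors cube_coors ch im
        = fsaB_body (PySem.Set.ofList cube_coors) (PySem.Set.ofList cube_coors)
            (fsaB_bounds cube_coors) ch im := by
      funext st c; exact body_eq cube_coors cube_coors ch im st c
    simp only [hb]
  | some a =>
    have hb : fsaA_body cube_coors a ch im
        = fsaB_body (PySem.Set.ofList a) (PySem.Set.ofList cube_coors)
            (fsaB_bounds cube_coors) ch im := by
      funext st c; exact body_eq cube_coors a ch im st c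
    simp only [hb]
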